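-- pv_equiv track=rewrite | github.com/EugeneAllison/Leetcode_advancer | 0.0.0. Amazon test.py | processQueriesOnCart
-- ===== SOURCE A (Python) =====
-- from collections import deque
--
-- def processQueriesOnCart(items, query):
--     cart = deque(items)
--     for q in query:
--         if q > 0:
--             cart.append(q)
--         else:
--             abs_q = abs(q)
--             try:
--                 cart.remove(abs_q)
--             except ValueError:
--                 pass
--     return list(cart)
-- ===== SOURCE B (Python) =====
-- from collections import deque
--
--
-- def processQueriesOnCart(items, query):
--     # entries[i] = [value, alive]; pos maps value -> deque of indices of its
--     # live occurrences, in increasing order (so the front is the first one).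
--     entries = []
--     pos = {}
--
--     def add(v):
--         i = len(entries)
--         entries.append([v, True])
--         pos.setdefault(v, deque()).append(i)
--
--     for v in items:
--         add(v)
--     for q in query:
--         if q > 0:
--             add(q)
--         else:
--             dq = pos.get(abs(q))
--             if dq:
--                 entries[dq.popleft()][1] = False
--     return [v for v, ok in entries if ok]
-- ===== Notes on version B (the rewrite author's own statement) =====
-- stated objective: alternative
-- what changed: Instead of a deque with remove-by-value scans, B records each element as a (value, alive) entry and keeps a per-value FIFO queue of live indices: a removal query pops the queue front and marks that entry dead, and the surviving values are emitted in one final pass.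
import Mathlib
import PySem

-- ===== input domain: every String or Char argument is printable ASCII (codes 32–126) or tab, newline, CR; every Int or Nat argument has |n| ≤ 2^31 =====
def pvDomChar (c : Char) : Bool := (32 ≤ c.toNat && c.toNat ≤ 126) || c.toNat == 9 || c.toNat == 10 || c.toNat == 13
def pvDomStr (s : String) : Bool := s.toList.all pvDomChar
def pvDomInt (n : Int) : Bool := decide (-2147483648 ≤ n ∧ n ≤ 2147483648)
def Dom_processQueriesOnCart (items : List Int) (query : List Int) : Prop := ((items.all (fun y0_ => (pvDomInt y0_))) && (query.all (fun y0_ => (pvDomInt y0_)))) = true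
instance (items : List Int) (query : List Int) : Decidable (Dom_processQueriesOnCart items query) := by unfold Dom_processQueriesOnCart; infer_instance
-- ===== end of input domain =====

-- B replaces A's deque-with-remove-by-value by a tombstone list of entries plus a
-- per-value FIFO queue of live indices (an alternative algorithm; the theorems
-- below prove return-value equality on Dom).

-- ===== PORT A =====
-- one query step of A: append positives, remove first occurrence of abs(q) (pass on ValueError)
def pvStepA (cart : List Int) (q : Int) : List Int :=
  if q > 0 then cart ++ [q]
  else
    match PySem.List.remove? cart |q| with
    | some c => c
    | none => cart

def processQueriesOnCart (items : List Int) (query : List Int) : List Int :=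
  query.foldl pvStepA items

-- ===== PORT B =====
-- B's state: the entries list [value, alive] and the dict value -> list (deque) of live indices
def pvAdd (s : List (Int × Bool) × PySem.Dict Int (List Nat)) (v : Int) :
    List (Int × Bool) × PySem.Dict Int (List Nat) :=
  let i := s.1.length
  (s.1 ++ [(v, true)], s.2.modify v [] (· ++ [i]))

def pvStepB (s : List (Int × Bool) × PySem.Dict Int (List Nat)) (q : Int) :
    List (Int × Bool) × PySem.Dict Int (List Nat) :=
  if q > 0 then pvAdd s q
  else
    match s.2.getD |q| [] with
    | [] => s
    | i :: rest => (s.1.modify i (fun p => (p.1, false)), s.2.insert |q| rest)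

def processQueriesOnCart_alt (items : List Int) (query : List Int) : List Int :=
  let s0 := items.foldl pvAdd ([], PySem.Dict.empty)
  let s := query.foldl pvStepB s0
  (s.1.filter (·.2)).map (·.1)

-- ===== PRECONDITION & SPEC =====
def Spec_processQueriesOnCart (items : List Int) (query : List Int) (out : List Int) : Prop := out = processQueriesOnCart_alt items query
instance (items : List Int) (query : List Int) (out : List Int) : Decidable (Spec_processQueriesOnCart items query out) := by unfold Spec_processQueriesOnCart; infer_instance

-- ===== CLAIM (what is proved, stated in full; the proofs are below) =====
def Claim_equal_processQueriesOnCart : Prop := ∀ (items : List Int) (query : List Int), Dom_processQueriesOnCart items query → Spec_processQueriesOnCart items query (processQueriesOnCart items query)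

-- ===== LEMMAS AND PROOFS =====

-- the sequence of live values of B's entries, in index order
def pvView (es : List (Int × Bool)) : List Int := (es.filter (·.2)).map (·.1)

-- the indices of live occurrences of value a, in increasing order
def pvIdxs (es : List (Int × Bool)) (a : Int) : List Nat :=
  (List.range es.length).filter (fun i => decide (es[i]? = some (a, true)))

-- the coupling invariant between A's cart and B's state
def pvInv (s : List (Int × Bool) × PySem.Dict Int (List Nat)) (cart : List Int) : Prop :=
  cart = pvView s.1 ∧ ∀ a : Int, s.2.getD a [] = pvIdxs s.1 a

theorem pvView_append (es : List (Int × Bool)) (v : Int) :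
    pvView (es ++ [(v, true)]) = pvView es ++ [v] := by
  simp [pvView]

theorem pvIdxs_append (es : List (Int × Bool)) (v a : Int) :
    pvIdxs (es ++ [(v, true)]) a
      = pvIdxs es a ++ (if a = v then [es.length] else []) := by
  unfold pvIdxs
  rw [List.length_append, List.length_cons, List.length_nil, Nat.add_zero,
    List.range_succ, List.filter_append]
  congr 1
  · apply List.filter_congr
    intro i hi
    rw [List.mem_range] at hi
    rw [List.getElem?_append_left hi]
  · simp only [List.filter_cons, List.filter_nil,
      List.getElem?_append_right (Nat.le_refl _), Nat.sub_self]
    by_cases h : a = v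
    · simp [h]
    · simp [h, Ne.symm h]

theorem pvIdxs_mem (es : List (Int × Bool)) (a : Int) (i : Nat)
    (h : i ∈ pvIdxs es a) : es[i]? = some (a, true) := by
  unfold pvIdxs at h
  have := List.of_mem_filter h
  simpa using this

theorem pvIdxs_pairwise (es : List (Int × Bool)) (a : Int) :
    (pvIdxs es a).Pairwise (· < ·) :=
  List.Pairwise.filter _ List.pairwise_lt_range

-- head of the live-index queue is the FIRST live occurrence of a
theorem pvIdxs_head_min (es : List (Int × Bool)) (a : Int) (i : Nat) (rest : List Nat)
    (h : pvIdxs es a = i :: rest) :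
    ∀ j < i, es[j]? ≠ some (a, true) := by
  intro j hj hjv
  have hjlen : j < es.length := by
    by_contra hge
    rw [List.getElem?_eq_none (Nat.le_of_not_lt hge)] at hjv
    simp at hjv
  have hjmem : j ∈ pvIdxs es a := by
    unfold pvIdxs
    exact List.mem_filter.mpr ⟨List.mem_range.mpr hjlen, by simpa using hjv⟩
  rw [h] at hjmem
  have hp := pvIdxs_pairwise es a
  rw [h, List.pairwise_cons] at hp
  rcases List.mem_cons.mp hjmem with rfl | hr
  · exact Nat.lt_irrefl j hj
  · exact Nat.lt_irrefl j (Nat.lt_trans hj (hp.1 j hr))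

-- no live occurrence of a  →  a does not occur in the view
theorem pvIdxs_nil_not_mem (es : List (Int × Bool)) (a : Int)
    (h : pvIdxs es a = []) : a ∉ pvView es := by
  intro hmem
  unfold pvView at hmem
  rcases List.mem_map.mp hmem with ⟨p, hp, hfst⟩
  have h2 : p.2 = true := by simpa using List.of_mem_filter hp
  have hpe : p ∈ es := List.mem_of_mem_filter hp
  rcases List.getElem?_of_mem hpe with ⟨i, hi⟩
  have : i ∈ pvIdxs es a := by
    unfold pvIdxs
    have hilen : i < es.length := by
      by_contra hge
      rw [List.getElem?_eq_none (Nat.le_of_not_lt hge)] at hi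
      simp at hi
    refine List.mem_filter.mpr ⟨List.mem_range.mpr hilen, ?_⟩
    have : p = (a, true) := by
      cases p
      simp_all
    simp [hi, this]
  rw [h] at this
  exact List.not_mem_nil this

-- killing the first live occurrence of a erases the first a from the view
theorem pvView_modify (es : List (Int × Bool)) (a : Int) (i : Nat)
    (hmem : es[i]? = some (a, true))
    (hmin : ∀ j < i, es[j]? ≠ some (a, true)) :
    pvView (es.modify i (fun p => (p.1, false))) = (pvView es).erase a := by
  induction es generalizing i with
  | nil => simp at hmem
  | cons p t ih =>
    cases i with
    | zero =>
      simp only [List.getElem?_cons_zero, Option.some_inj] at hmem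
      subst hmem
      simp [pvView, List.modify]
    | succ j =>
      have hp0 : p ≠ (a, true) := by
        intro hpe
        exact hmin 0 (Nat.succ_pos j) (by simp [hpe])
      have hmem' : t[j]? = some (a, true) := by simpa using hmem
      have hmin' : ∀ k < j, t[k]? ≠ some (a, true) := by
        intro k hk
        have := hmin (k + 1) (Nat.succ_lt_succ hk)
        simpa using this
      have ihres := ih j hmem' hmin'
      obtain ⟨b, c⟩ := p
      cases c with
      | false =>
        simpa [pvView, List.modify_succ_cons] using ihres
      | true =>
        have hba : b ≠ a := by
          intro hba; exact hp0 (by rw [hba])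
        have h1 : pvView ((b, true) :: t.modify j (fun p => (p.1, false)))
            = b :: pvView (t.modify j (fun p => (p.1, false))) := by simp [pvView]
        have h2 : pvView ((b, true) :: t) = b :: pvView t := by simp [pvView]
        rw [List.modify_succ_cons, h1, h2, List.erase_cons_tail (by simp [hba]), ihres]

-- killing index i (a live a-entry) pops it from a's queue …
theorem pvIdxs_modify_self (es : List (Int × Bool)) (a : Int) (i : Nat) (rest : List Nat)
    (h : pvIdxs es a = i :: rest) :
    pvIdxs (es.modify i (fun p => (p.1, false))) a = rest := by
  have hmem : es[i]? = some (a, true) := pvIdxs_mem es a i (by rw [h]; exact List.mem_cons_self ..)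
  have hnotin : i ∉ rest := by
    have hp := pvIdxs_pairwise es a
    rw [h, List.pairwise_cons] at hp
    intro hir
    exact Nat.lt_irrefl i (hp.1 i hir)
  have step : pvIdxs (es.modify i (fun p => (p.1, false))) a
      = (pvIdxs es a).filter (fun j => decide (j ≠ i)) := by
    unfold pvIdxs
    rw [List.length_modify, List.filter_filter]
    apply List.filter_congr
    intro j hj
    rw [List.getElem?_modify]
    by_cases hji : j = i
    · subst hji
      simp [hmem]
    · have : ¬ (i = j) := fun h' => hji h'.symm
      simp [this, hji]
  rw [step, h, List.filter_cons_of_neg (by simp), List.filter_eq_self.mpr]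
  intro j hj
  simp only [decide_eq_true_eq]
  intro hji
  exact hnotin (hji ▸ hj)

-- … and leaves every other value's queue unchanged
theorem pvIdxs_modify_other (es : List (Int × Bool)) (a b : Int) (i : Nat)
    (hmem : es[i]? = some (a, true)) (hba : b ≠ a) :
    pvIdxs (es.modify i (fun p => (p.1, false))) b = pvIdxs es b := by
  unfold pvIdxs
  rw [List.length_modify]
  apply List.filter_congr
  intro j hj
  rw [List.getElem?_modify]
  by_cases hij : i = j
  · subst hij
    simp [hmem, hba.symm]
  · simp [hij]

theorem pvAdd_inv (s : List (Int × Bool) × PySem.Dict Int (List Nat)) (cart : List Int)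
    (v : Int) (h : pvInv s cart) : pvInv (pvAdd s v) (cart ++ [v]) := by
  obtain ⟨hview, hpos⟩ := h
  constructor
  · rw [hview, pvAdd, pvView_append]
  · intro a
    simp only [pvAdd]
    rw [PySem.Dict.getD_modify, pvIdxs_append]
    by_cases hav : a = v
    · subst hav
      rw [if_pos rfl, if_pos rfl, hpos]
    · rw [if_neg hav, if_neg hav, hpos, List.append_nil]

theorem pvStep_inv (s : List (Int × Bool) × PySem.Dict Int (List Nat)) (cart : List Int)
    (q : Int) (h : pvInv s cart) : pvInv (pvStepB s q) (pvStepA cart q) := by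
  obtain ⟨hview, hpos⟩ := h
  by_cases hq : q > 0
  · simpa [pvStepA, pvStepB, hq] using pvAdd_inv s cart q ⟨hview, hpos⟩
  · simp only [pvStepA, pvStepB, if_neg hq]
    rcases hidx : s.2.getD |q| [] with _ | ⟨i, rest⟩
    · -- queue empty: |q| not in cart, remove? is none on both conceptually
      have hnm : |q| ∉ cart := by
        rw [hview]
        exact pvIdxs_nil_not_mem s.1 |q| (by rw [← hpos]; exact hidx)
      rw [(PySem.List.remove?_eq_none_iff cart |q|).mpr hnm]
      exact ⟨hview, hpos⟩
    · -- queue head i = first live occurrence of |q|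
      have hq' : s.2.getD |q| [] = i :: rest := hidx
      rw [hpos] at hq'
      have hmem : s.1[i]? = some (|q|, true) :=
        pvIdxs_mem s.1 |q| i (by rw [hq']; exact List.mem_cons_self ..)
      have hmin := pvIdxs_head_min s.1 |q| i rest hq'
      have hvmem : |q| ∈ cart := by
        rw [hview]
        unfold pvView
        refine List.mem_map.mpr ⟨(|q|, true), ?_, rfl⟩
        exact List.mem_filter.mpr ⟨List.mem_of_getElem? hmem, by simp⟩
      rw [PySem.List.remove?_eq_some_erase cart |q| hvmem]
      constructor
      · rw [hview]
        exact (pvView_modify s.1 |q| i hmem hmin).symm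
      · intro b
        rw [PySem.Dict.getD_insert]
        by_cases hb : b = |q|
        · subst hb
          rw [if_pos rfl, pvIdxs_modify_self s.1 |q| i rest hq']
        · rw [if_neg hb, pvIdxs_modify_other s.1 |q| b i hmem hb, hpos]

theorem pvFoldAdd_inv (items : List Int)
    (s : List (Int × Bool) × PySem.Dict Int (List Nat)) (cart : List Int)
    (h : pvInv s cart) : pvInv (items.foldl pvAdd s) (cart ++ items) := by
  induction items generalizing s cart with
  | nil => simpa using h
  | cons v t ih =>
    have := ih (pvAdd s v) (cart ++ [v]) (pvAdd_inv s cart v h)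
    simpa using this

theorem pvFoldStep_inv (query : List Int)
    (s : List (Int × Bool) × PySem.Dict Int (List Nat)) (cart : List Int)
    (h : pvInv s cart) : pvInv (query.foldl pvStepB s) (query.foldl pvStepA cart) := by
  induction query generalizing s cart with
  | nil => exact h
  | cons q t ih => exact ih (pvStepB s q) (pvStepA cart q) (pvStep_inv s cart q h)

theorem pvInv_empty : pvInv (([], PySem.Dict.empty) :
    List (Int × Bool) × PySem.Dict Int (List Nat)) [] := by
  constructor
  · rfl
  · intro a
    simp [PySem.Dict.getD, PySem.Dict.get?, PySem.Dict.empty, pvIdxs]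

-- ===== VERDICT (by name: the statement is the Claim_ definition above) =====
theorem processQueriesOnCart_spec : Claim_equal_processQueriesOnCart := by
  intro items query _
  unfold Spec_processQueriesOnCart processQueriesOnCart processQueriesOnCart_alt
  have h0 := pvFoldAdd_inv items _ [] pvInv_empty
  rw [List.nil_append] at h0
  have h := pvFoldStep_inv query _ items h0
  exact h.1
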